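-- pv_equiv track=rewrite | github.com/DoctorMen/Recon-automation-Bug-bounty-stack | ADVANCED_PENETRATION_TESTING_FRAMEWORK.py | _detect_frameworks
-- ===== SOURCE A (Python) =====
-- from typing import Dict, List, Optional, Tuple, Any
--
-- def _detect_frameworks(headers: Dict) -> List[str]:
--     """Detect web frameworks from headers"""
--     frameworks = []
--
--     indicators = {
--         'ASP.NET': ['X-AspNet-Version', 'X-AspNetMvc-Version'],
--         'Express': ['X-Powered-By: Express'],
--         'Django': ['Set-Cookie: csrftoken'],
--         'WordPress': ['X-Pingback', 'wp-json'],
--         'Drupal': ['X-Drupal-Cache'],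
--         'Joomla': ['X-Generator: Joomla!']
--     }
--
--     for framework, indicators_list in indicators.items():
--         for indicator in indicators_list:
--             for header_name, header_value in headers.items():
--                 if indicator.lower() in f"{header_name}: {header_value}".lower():
--                     frameworks.append(framework)
--                     break
--
--     return frameworks
-- ===== SOURCE B (Python) =====
-- def _detect_frameworks(headers):
--     """Detect web frameworks from headers"""
--     indicators = {
--         'ASP.NET': ['X-AspNet-Version', 'X-AspNetMvc-Version'],
--         'Express': ['X-Powered-By: Express'],
--         'Django': ['Set-Cookie: csrftoken'],
--         'WordPress': ['X-Pingback', 'wp-json'],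
--         'Drupal': ['X-Drupal-Cache'],
--         'Joomla': ['X-Generator: Joomla!']
--     }
--     # one lowered blob; '\n' occurs in no indicator, so no cross-header matches
--     combined = '\n'.join(f"{name}: {value}".lower() for name, value in headers.items())
--     return [framework
--             for framework, indicators_list in indicators.items()
--             for indicator in indicators_list
--             if indicator.lower() in combined]
-- ===== Notes on version B (the rewrite author's own statement) =====
-- stated objective: simpler
-- what changed: B concatenates all headers once into a single lowered newline-joined string and replaces A's inner per-header scan (with break) by one substring test per indicator, the result built as a comprehension instead of nested loops with an accumulator.
import Mathlib
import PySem

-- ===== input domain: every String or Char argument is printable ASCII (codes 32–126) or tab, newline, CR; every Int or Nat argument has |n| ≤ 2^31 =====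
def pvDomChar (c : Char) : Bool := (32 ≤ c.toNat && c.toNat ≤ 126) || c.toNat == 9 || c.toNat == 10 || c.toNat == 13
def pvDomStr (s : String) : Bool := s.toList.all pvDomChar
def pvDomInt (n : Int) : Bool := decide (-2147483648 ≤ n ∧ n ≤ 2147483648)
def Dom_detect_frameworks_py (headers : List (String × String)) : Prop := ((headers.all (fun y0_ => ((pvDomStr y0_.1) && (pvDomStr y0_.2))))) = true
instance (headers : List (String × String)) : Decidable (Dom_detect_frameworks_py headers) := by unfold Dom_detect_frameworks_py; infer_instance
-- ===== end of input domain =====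

-- B builds one lowered newline-joined blob of all headers and tests each indicator against it once
-- (a comprehension), instead of A's per-indicator scan over the headers with a break: simpler decomposition.

-- shared vocabulary of both ports: indicator.lower() and f"{name}: {value}".lower()
def indLower (ind : String) : List Char := PySem.Chars.lower ind.toList
def hayLower (p : String × String) : List Char := PySem.Chars.lower (p.1.toList ++ ':' :: ' ' :: p.2.toList)

-- ===== PORT A =====
def aIndicators : List (String × List String) :=
  [("ASP.NET", ["X-AspNet-Version", "X-AspNetMvc-Version"]),
   ("Express", ["X-Powered-By: Express"]),
   ("Django", ["Set-Cookie: csrftoken"]),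
   ("WordPress", ["X-Pingback", "wp-json"]),
   ("Drupal", ["X-Drupal-Cache"]),
   ("Joomla", ["X-Generator: Joomla!"])]

-- the inner 'for header_name, header_value in headers.items(): if … : append; break'
def aHeaderScan (ind : String) (fw : String) : List (String × String) → List String → List String
  | [], fs => fs
  | p :: rest, fs =>
      if PySem.Chars.isIn (indLower ind) (hayLower p) then fs ++ [fw]
      else aHeaderScan ind fw rest fs

def detect_frameworks_py (headers : List (String × String)) : List String :=
  aIndicators.foldl
    (fun fs p => p.2.foldl (fun fs ind => aHeaderScan ind p.1 (PySem.Dict.ofList headers).items fs) fs)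
    []

-- ===== PORT B =====
def bIndicators : List (String × List String) :=
  [("ASP.NET", ["X-AspNet-Version", "X-AspNetMvc-Version"]),
   ("Express", ["X-Powered-By: Express"]),
   ("Django", ["Set-Cookie: csrftoken"]),
   ("WordPress", ["X-Pingback", "wp-json"]),
   ("Drupal", ["X-Drupal-Cache"]),
   ("Joomla", ["X-Generator: Joomla!"])]

def detect_frameworks_py_alt (headers : List (String × String)) : List String :=
  let combined := PySem.Chars.join ['\n'] (((PySem.Dict.ofList headers).items).map hayLower)
  bIndicators.flatMap (fun p =>
    p.2.flatMap (fun ind => if PySem.Chars.isIn (indLower ind) combined then [p.1] else []))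

-- ===== PRECONDITION & SPEC =====
def Spec_detect_frameworks_py (headers : List (String × String)) (out : List String) : Prop := out = detect_frameworks_py_alt headers
instance (headers : List (String × String)) (out : List String) : Decidable (Spec_detect_frameworks_py headers out) := by unfold Spec_detect_frameworks_py; infer_instance

-- ===== CLAIM (what is proved, stated in full; the proofs are below) =====
def Claim_equal_detect_frameworks_py : Prop := ∀ (headers : List (String × String)), Dom_detect_frameworks_py headers → Spec_detect_frameworks_py headers (detect_frameworks_py headers)

-- ===== LEMMAS AND PROOFS =====

-- a prefix that avoids the separator cannot reach past it
lemma prefix_no_sep {c : Char} {sub r : List Char} :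
    ∀ (a : List Char), c ∉ sub → sub <+: a ++ c :: r → sub <+: a := by
  intro a; induction a generalizing sub with
  | nil =>
    intro hc h
    cases sub with
    | nil => exact List.nil_prefix
    | cons x s =>
      rw [List.nil_append, List.cons_prefix_cons] at h
      exact absurd (h.1 ▸ List.mem_cons_self) hc
  | cons y a ih =>
    intro hc h
    cases sub with
    | nil => exact List.nil_prefix
    | cons x s =>
      rw [List.cons_append, List.cons_prefix_cons] at h
      have hs : c ∉ s := fun hm => hc (List.mem_cons_of_mem _ hm)
      exact List.cons_prefix_cons.mpr ⟨h.1, ih hs h.2⟩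

-- an infix that avoids the separator lies wholly on one side of it
lemma infix_no_sep {c : Char} {sub r : List Char} :
    ∀ (l : List Char), c ∉ sub → sub <:+: l ++ c :: r → sub <:+: l ∨ sub <:+: r := by
  intro l; induction l with
  | nil =>
    intro hc h
    rcases List.infix_cons_iff.mp (List.nil_append (c :: r) ▸ h) with hp | hi
    · have : sub <+: ([] : List Char) := prefix_no_sep [] hc (by simpa using hp)
      simp [List.prefix_nil] at this
      exact Or.inr (this ▸ List.nil_infix)
    · exact Or.inr hi
  | cons y l ih =>
    intro hc h
    rcases List.infix_cons_iff.mp (by simpa using h) with hp | hi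
    · exact Or.inl ((prefix_no_sep (y :: l) hc (by simpa using hp)).isInfix)
    · rcases ih hc hi with h1 | h2
      · exact Or.inl (List.infix_cons_iff.mpr (Or.inr h1))
      · exact Or.inr h2

-- a nonempty needle not containing the separator is in the join iff it is in some piece
lemma infix_join (c : Char) (sub : List Char) (hc : c ∉ sub) (hs : sub ≠ []) :
    ∀ (pieces : List (List Char)),
      (sub <:+: PySem.Chars.join [c] pieces ↔ ∃ p ∈ pieces, sub <:+: p) := by
  intro pieces
  induction pieces with
  | nil =>
    rw [PySem.Chars.join_nil]
    simp [List.infix_nil, hs]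
  | cons p rest ih =>
    cases rest with
    | nil => rw [PySem.Chars.join_singleton]; simp
    | cons q rest' =>
      rw [PySem.Chars.join_cons_cons]
      constructor
      · intro h
        have h' : sub <:+: p ++ c :: PySem.Chars.join [c] (q :: rest') := by
          simpa [List.append_assoc] using h
        rcases infix_no_sep p hc h' with h1 | h2
        · exact ⟨p, List.mem_cons_self, h1⟩
        · rcases ih.mp h2 with ⟨p', hm, hi⟩
          exact ⟨p', List.mem_cons_of_mem _ hm, hi⟩
      · rintro ⟨p', hm, hi⟩
        rcases List.mem_cons.mp hm with rfl | hm'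
        · exact hi.trans (by rw [List.append_assoc]; exact (List.prefix_append _ _).isInfix)
        · exact (ih.mpr ⟨p', hm', hi⟩).trans ((List.suffix_append _ _).isInfix)

-- A's break-loop appends the framework once iff some header matches
lemma scan_eq (ind fw : String) :
    ∀ (items : List (String × String)) (fs : List String),
      aHeaderScan ind fw items fs
        = if items.any (fun p => PySem.Chars.isIn (indLower ind) (hayLower p)) then fs ++ [fw] else fs := by
  intro items
  induction items with
  | nil => intro fs; simp [aHeaderScan]
  | cons p rest ih =>
    intro fs
    by_cases h : PySem.Chars.isIn (indLower ind) (hayLower p)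
    · simp [aHeaderScan, h]
    · simp only [Bool.not_eq_true] at h
      simp only [aHeaderScan, h, if_false, Bool.false_eq_true, ih, List.any_cons]
      rw [Bool.false_or]

-- the blob test equals the per-header any-test
lemma blob_eq (ind : String) (items : List (String × String))
    (hne : indLower ind ≠ []) (hnl : '\n' ∉ indLower ind) :
    PySem.Chars.isIn (indLower ind) (PySem.Chars.join ['\n'] (items.map hayLower))
      = items.any (fun p => PySem.Chars.isIn (indLower ind) (hayLower p)) := by
  rw [Bool.eq_iff_iff, PySem.Chars.isIn_iff_infix, List.any_eq_true,
      infix_join '\n' (indLower ind) hnl hne]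
  constructor
  · rintro ⟨p, hm, hi⟩
    rcases List.mem_map.mp hm with ⟨q, hq, rfl⟩
    exact ⟨q, hq, (PySem.Chars.isIn_iff_infix _ _).mpr hi⟩
  · rintro ⟨q, hq, hi⟩
    exact ⟨hayLower q, List.mem_map_of_mem hq, (PySem.Chars.isIn_iff_infix _ _).mp hi⟩

-- an accumulator loop appending singletons is the comprehension
lemma foldl_if_append (fw : String) (cond : String → Bool) :
    ∀ (inds : List String) (fs : List String),
      inds.foldl (fun fs ind => if cond ind then fs ++ [fw] else fs) fs
        = fs ++ inds.flatMap (fun ind => if cond ind then [fw] else []) := by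
  intro inds
  induction inds with
  | nil => intro fs; simp
  | cons a t ih =>
    intro fs
    by_cases h : cond a <;> simp [h, ih, List.append_assoc]

lemma foldl_flat (cond : String → Bool) :
    ∀ (l : List (String × List String)) (fs : List String),
      l.foldl (fun fs p => p.2.foldl (fun fs ind => if cond ind then fs ++ [p.1] else fs) fs) fs
        = fs ++ l.flatMap (fun p => p.2.flatMap (fun ind => if cond ind then [p.1] else [])) := by
  intro l
  induction l with
  | nil => intro fs; simp
  | cons a t ih =>
    intro fs
    rw [List.foldl_cons, foldl_if_append, ih, List.flatMap_cons, List.append_assoc]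

lemma ports_agree (headers : List (String × String)) :
    detect_frameworks_py headers = detect_frameworks_py_alt headers := by
  unfold detect_frameworks_py detect_frameworks_py_alt aIndicators bIndicators
  generalize (PySem.Dict.ofList headers).items = items
  simp only [scan_eq]
  rw [foldl_flat (fun ind => items.any (fun p => PySem.Chars.isIn (indLower ind) (hayLower p)))]
  simp only [List.nil_append, List.flatMap_cons, List.flatMap_nil, List.append_nil]
  rw [blob_eq "X-AspNet-Version" items (by decide) (by decide),
      blob_eq "X-AspNetMvc-Version" items (by decide) (by decide),
      blob_eq "X-Powered-By: Express" items (by decide) (by decide),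
      blob_eq "Set-Cookie: csrftoken" items (by decide) (by decide),
      blob_eq "X-Pingback" items (by decide) (by decide),
      blob_eq "wp-json" items (by decide) (by decide),
      blob_eq "X-Drupal-Cache" items (by decide) (by decide),
      blob_eq "X-Generator: Joomla!" items (by decide) (by decide)]

-- ===== VERDICT (by name: the statement is the Claim_ definition above) =====
theorem detect_frameworks_py_spec : Claim_equal_detect_frameworks_py := by
  intro headers _
  exact ports_agree headers
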